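-- pv_equiv track=rewrite | github.com/jun7867/problem-solving-algorithm | python/Programmers/heap/spicy.py | solution
-- ===== SOURCE A (Python) =====
-- import heapq
--
-- def solution(scoville, K):
--     heapq.heapify(scoville)
--     count=0
--     while scoville[0] < K :
--         if len(scoville) ==1:
--             return -1
--         heapq.heappush(scoville,heapq.heappop(scoville)+ heapq.heappop(scoville)*2)
--         count+=1
--
--     return count
-- ===== SOURCE B (Python) =====
-- def solution(scoville, K):
--     # sorted-array version: sort in place once, then pop the two smallest from the
--     # front and re-insert the mix at its sorted position by a linear scan
--     scoville.sort()
--     count = 0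
--     while scoville[0] < K:
--         if len(scoville) == 1:
--             return -1
--         new = scoville[0] + scoville[1] * 2
--         del scoville[:2]
--         i = 0
--         while i < len(scoville) and scoville[i] < new:
--             i += 1
--         scoville.insert(i, new)
--         count += 1
--     return count
-- ===== Notes on version B (the rewrite author's own statement) =====
-- stated objective: alternative
-- what changed: Replaces the binary heap with a sorted array maintained in place: sort once, pop the two smallest from the front, and re-insert the mixed value at its sorted position by a linear scan.
import Mathlib
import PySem

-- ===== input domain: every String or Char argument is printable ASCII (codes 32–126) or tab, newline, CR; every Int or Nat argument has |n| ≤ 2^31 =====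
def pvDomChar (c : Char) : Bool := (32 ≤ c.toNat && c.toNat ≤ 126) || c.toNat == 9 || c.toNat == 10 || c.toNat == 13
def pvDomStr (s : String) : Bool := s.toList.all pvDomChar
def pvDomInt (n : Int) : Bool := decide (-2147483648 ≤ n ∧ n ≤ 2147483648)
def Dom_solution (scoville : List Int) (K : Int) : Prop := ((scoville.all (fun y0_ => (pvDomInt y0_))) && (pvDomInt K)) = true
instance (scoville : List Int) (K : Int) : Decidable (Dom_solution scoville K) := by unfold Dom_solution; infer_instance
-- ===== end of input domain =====

-- B replaces A's binary heap by a sorted array maintained in place (alternative structure,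
-- same cost class); both versions mutate the argument list in Python — the equivalence
-- proved here is about the RETURN value only.

-- ===== PORT A =====
-- A's heap is modelled by its content list: heapify leaves the content unchanged,
-- heappop returns and removes the minimum value (the heap root), heappush appends the
-- value to the content.  The return value of A depends only on this content.
def solutionGo (h : List Int) (K : Int) (count : Int) : Int :=
  if h0 : h = [] then 0  -- unreachable: Python raises IndexError at scoville[0]; Pre_ excludes []
  else
    let m := (PySem.List.min? h (fun x => x)).getD 0      -- scoville[0] / first heappop
    if m < K then
      if hl : h.length = 1 then -1
      else
        let h1 := h.erase m                                -- heappop removes the min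
        let m2 := (PySem.List.min? h1 (fun x => x)).getD 0 -- second heappop
        solutionGo (h1.erase m2 ++ [m + m2 * 2]) K (count + 1)  -- heappush of the mix
    else count
  termination_by h.length
  decreasing_by
    have hm : (PySem.List.min? h (fun x => x)).getD 0 ∈ h := by
      cases hmin : PySem.List.min? h (fun x => x) with
      | none => exact absurd ((PySem.List.min?_eq_none_iff _ _).mp hmin) h0
      | some v => simpa [hmin] using PySem.List.min?_mem hmin
    have h1len : (h.erase ((PySem.List.min? h (fun x => x)).getD 0)).length = h.length - 1 := by
      rw [List.length_erase_of_mem hm]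
    have hne1 : h.erase ((PySem.List.min? h (fun x => x)).getD 0) ≠ [] := by
      have : 1 ≤ h.length := List.length_pos_iff.mpr h0
      intro he; rw [he] at h1len; simp at h1len; omega
    have hm2 : (PySem.List.min? (h.erase ((PySem.List.min? h (fun x => x)).getD 0)) (fun x => x)).getD 0
        ∈ h.erase ((PySem.List.min? h (fun x => x)).getD 0) := by
      cases hmin : PySem.List.min? (h.erase ((PySem.List.min? h (fun x => x)).getD 0)) (fun x => x) with
      | none => exact absurd ((PySem.List.min?_eq_none_iff _ _).mp hmin) hne1
      | some v => simpa [hmin] using PySem.List.min?_mem hmin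
    have h2len := List.length_erase_of_mem hm2
    have : 1 ≤ h.length := List.length_pos_iff.mpr h0
    simp only [List.length_append, List.length_cons, List.length_nil]
    omega

def solution (scoville : List Int) (K : Int) : Int :=
  solutionGo scoville K 0

-- ===== PORT B =====
-- linear insertion into an ascending list (B's inner while + insert)
def insertAsc (x : Int) : List Int → List Int
  | [] => [x]
  | y :: ys => if y < x then y :: insertAsc x ys else x :: y :: ys

theorem insertAsc_length (x : Int) (l : List Int) : (insertAsc x l).length = l.length + 1 := by
  induction l with
  | nil => simp [insertAsc]
  | cons y ys ih => simp only [insertAsc]; split <;> simp [ih]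

def altGo : List Int → Int → Int → Int
  | [], _, _ => 0  -- unreachable: Python raises IndexError at scoville[0]; Pre_ excludes []
  | [a], K, count => if a < K then -1 else count
  | a :: b :: rest, K, count =>
    if a < K then altGo (insertAsc (a + b * 2) rest) K (count + 1)
    else count
  termination_by s => s.length
  decreasing_by
    simp [insertAsc_length]

def solution_alt (scoville : List Int) (K : Int) : Int :=
  altGo (PySem.List.sorted scoville (fun x => x) false) K 0

-- ===== PRECONDITION & SPEC =====
-- Pre_ excludes exactly the empty list, on which A raises IndexError at scoville[0].
def Pre_solution (scoville : List Int) (K : Int) : Prop := scoville ≠ []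
instance (scoville : List Int) (K : Int) : Decidable (Pre_solution scoville K) := by
  unfold Pre_solution; infer_instance
def pvWitness_solution : List Int × Int := ([1, 2, 3], 7)

def Spec_solution (scoville : List Int) (K : Int) (out : Int) : Prop := out = solution_alt scoville K
instance (scoville : List Int) (K : Int) (out : Int) : Decidable (Spec_solution scoville K out) := by unfold Spec_solution; infer_instance

-- ===== CLAIM (what is proved, stated in full; the proofs are below) =====
def Claim_equal_solution : Prop := ∀ (scoville : List Int) (K : Int), Dom_solution scoville K → Pre_solution scoville K → Spec_solution scoville K (solution scoville K)

-- ===== LEMMAS AND PROOFS =====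

theorem insertAsc_perm (x : Int) (l : List Int) : (insertAsc x l).Perm (x :: l) := by
  induction l with
  | nil => simp [insertAsc]
  | cons y ys ih =>
    simp only [insertAsc]
    split
    · exact ((ih.cons y).trans (List.Perm.swap x y ys))
    · rfl

theorem insertAsc_sorted (x : Int) (l : List Int) (hs : l.Pairwise (· ≤ ·)) :
    (insertAsc x l).Pairwise (· ≤ ·) := by
  induction l with
  | nil => simp [insertAsc]
  | cons y ys ih =>
    rcases List.pairwise_cons.mp hs with ⟨hy, hys⟩
    simp only [insertAsc]
    split
    · rename_i hlt
      refine List.pairwise_cons.mpr ⟨?_, ih hys⟩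
      intro z hz
      have hz' : z ∈ x :: ys := (insertAsc_perm x ys).mem_iff.mp hz
      rcases List.mem_cons.mp hz' with h | h
      · exact le_of_lt (h ▸ hlt)
      · exact hy z h
    · rename_i hge
      refine List.pairwise_cons.mpr ⟨?_, hs⟩
      intro z hz
      rcases List.mem_cons.mp hz with h | h
      · omega
      · exact le_trans (by omega) (hy z h)

-- the first element of a sorted permutation is exactly the value min? returns
theorem min?_of_perm_sorted (h : List Int) (a : Int) (t : List Int)
    (hp : h.Perm (a :: t)) (hs : (a :: t).Pairwise (· ≤ ·)) :
    (PySem.List.min? h (fun x => x)).getD 0 = a := by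
  have hne : h ≠ [] := by
    intro he; rw [he] at hp; exact absurd hp.symm (by simp)
  cases hmin : PySem.List.min? h (fun x => x) with
  | none => exact absurd ((PySem.List.min?_eq_none_iff _ _).mp hmin) hne
  | some m =>
    have hmem : m ∈ h := PySem.List.min?_mem hmin
    have hmin' := PySem.List.min?_isMin hmin
    have hma : m ≤ a := hmin' a (hp.mem_iff.mpr (List.mem_cons_self))
    have ham : a ≤ m := by
      rcases List.mem_cons.mp (hp.mem_iff.mp hmem) with h' | h'
      · omega
      · exact (List.pairwise_cons.mp hs).1 m h'
    simp; omega

-- main invariant: A's heap loop on any content list equals B's loop on a sorted permutation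
theorem go_eq (n : Nat) : ∀ (h s : List Int) (K c : Int), h.length = n →
    h.Perm s → s.Pairwise (· ≤ ·) → solutionGo h K c = altGo s K c := by
  induction n using Nat.strong_induction_on with
  | _ n ih =>
    intro h s K c hn hp hs
    cases s with
    | nil =>
      have hh : h = [] := List.Perm.eq_nil hp
      rw [hh, solutionGo, altGo]; simp
    | cons a s' =>
    cases s' with
    | nil =>
      have hha : h = [a] := List.perm_singleton.mp hp
      subst hha
      rw [solutionGo, altGo]
      simp [PySem.List.min?_id_cons]
    | cons b rest =>
      have hlen : h.length = rest.length + 2 := by simpa using hp.length_eq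
      have hne : h ≠ [] := by intro he; rw [he] at hlen; simp at hlen
      have hma : (PySem.List.min? h (fun x => x)).getD 0 = a :=
        min?_of_perm_sorted h a (b :: rest) hp hs
      rw [solutionGo, altGo]
      simp only [hne, dite_false, hma]
      by_cases hK : a < K
      · simp only [hK, if_true]
        have hl1 : ¬ h.length = 1 := by omega
        simp only [hl1, dif_neg, not_false_iff]
        -- the erased lists
        have hp1 : (h.erase a).Perm (b :: rest) := by
          have := hp.erase a
          simpa [List.erase_cons_head] using this
        have hs1 : (b :: rest).Pairwise (· ≤ ·) := (List.pairwise_cons.mp hs).2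
        have hmb : (PySem.List.min? (h.erase a) (fun x => x)).getD 0 = b :=
          min?_of_perm_sorted (h.erase a) b rest hp1 hs1
        rw [hmb]
        have hp2 : ((h.erase a).erase b).Perm rest := by
          have := hp1.erase b
          simpa [List.erase_cons_head] using this
        have hparg : ((h.erase a).erase b ++ [a + b * 2]).Perm (insertAsc (a + b * 2) rest) := by
          -- l ++ [x] ~ x :: l ~ x :: rest ~ insertAsc x rest
          exact (List.perm_append_comm.trans (hp2.cons (a + b * 2))).trans
            (insertAsc_perm (a + b * 2) rest).symm
        have hsarg : (insertAsc (a + b * 2) rest).Pairwise (· ≤ ·) :=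
          insertAsc_sorted _ _ (List.pairwise_cons.mp hs1).2
        have hlarg : ((h.erase a).erase b ++ [a + b * 2]).length = rest.length + 1 := by
          have := hparg.length_eq
          simp only [List.length_append, List.length_cons, List.length_nil,
            insertAsc_length] at this ⊢
          omega
        exact ih (rest.length + 1) (by omega) _ _ K (c + 1) hlarg hparg hsarg
      · simp [hK]

-- ===== VERDICT (by name: the statement is the Claim_ definition above) =====
theorem solution_spec : Claim_equal_solution := by
  intro scoville K _hdom _hpre
  unfold Spec_solution solution solution_alt
  exact go_eq scoville.length scoville _ K 0 rfl
    (PySem.List.sorted_perm scoville (fun x => x) false).symm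
    (PySem.List.sorted_pairwise scoville (fun x => x))
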